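-- pv_equiv track=rewrite | github.com/Dagobert42/Prompt-Based-Data-Augmentation-for-Semantic-Frames | data/wnut_17/tp.py | extract_frame
-- ===== SOURCE A (Python) =====
-- def extract_frame(tokens, labels):
--     frame = {}
--     for token, label in zip(tokens, labels):
--         if label != "null":
--             try:
--                 frame[label].append(token)
--             except:
--                 frame[label] = [token]
--     return frame
-- ===== SOURCE B (Python) =====
-- def extract_frame(tokens, labels):
--     pairs = list(zip(tokens, labels))
--     # ordered distinct non-null labels (first appearance order)
--     keys = list(dict.fromkeys(l for _, l in pairs if l != "null"))
--     # one filtering pass per label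
--     return {k: [t for t, l in pairs if l == k] for k in keys}
-- ===== Notes on version B (the rewrite author's own statement) =====
-- stated objective: alternative
-- what changed: Replaces the single accumulating dict pass (append-or-create per pair) by a two-level shape: first compute the ordered distinct non-null labels with dict.fromkeys, then build each group by a separate filtering pass over the zipped pairs.
import Mathlib
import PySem

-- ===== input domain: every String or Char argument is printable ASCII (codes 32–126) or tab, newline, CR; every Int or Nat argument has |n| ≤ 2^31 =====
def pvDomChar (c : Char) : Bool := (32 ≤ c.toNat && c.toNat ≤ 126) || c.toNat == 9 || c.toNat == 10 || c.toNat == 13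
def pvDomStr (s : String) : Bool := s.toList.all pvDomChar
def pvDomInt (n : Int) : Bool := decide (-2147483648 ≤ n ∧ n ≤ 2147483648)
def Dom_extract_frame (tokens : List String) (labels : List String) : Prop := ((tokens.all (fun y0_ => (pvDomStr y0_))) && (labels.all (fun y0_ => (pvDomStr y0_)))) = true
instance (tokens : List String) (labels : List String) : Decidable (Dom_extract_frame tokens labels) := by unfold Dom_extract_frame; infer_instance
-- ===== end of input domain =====

-- B groups tokens by first listing the distinct non-null labels and then filtering once
-- per label, instead of A's single accumulating dict pass; alternative decomposition, not faster.

-- ===== PORT A =====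
def extract_frame (tokens : List String) (labels : List String) : List (String × List String) :=
  ((List.zip tokens labels).foldl
    (fun frame p => if p.2 ≠ "null" then frame.modify p.2 [] (· ++ [p.1]) else frame)
    PySem.Dict.empty).items

-- ===== PORT B =====
def extract_frame_alt (tokens : List String) (labels : List String) : List (String × List String) :=
  let pairs := List.zip tokens labels
  let keys := PySem.List.dedup ((pairs.filter (fun p => p.2 ≠ "null")).map (·.2))
  keys.map (fun k => (k, (pairs.filter (fun p => p.2 == k)).map (·.1)))

-- ===== PRECONDITION & SPEC =====
def Spec_extract_frame (tokens : List String) (labels : List String) (out : List (String × List String)) : Prop := out = extract_frame_alt tokens labels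
instance (tokens : List String) (labels : List String) (out : List (String × List String)) : Decidable (Spec_extract_frame tokens labels out) := by unfold Spec_extract_frame; infer_instance

-- ===== CLAIM (what is proved, stated in full; the proofs are below) =====
def Claim_equal_extract_frame : Prop := ∀ (tokens : List String) (labels : List String), Dom_extract_frame tokens labels → Spec_extract_frame tokens labels (extract_frame tokens labels)

-- ===== LEMMAS AND PROOFS =====

-- a foldl whose else-branch is the identity is a foldl over the filtered list
theorem foldl_if_filter {α β : Type} (c : α → Prop) [DecidablePred c] (f : β → α → β) :
    ∀ (l : List α) (d : β),
      l.foldl (fun d x => if c x then f d x else d) d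
        = (l.filter (fun x => decide (c x))).foldl f d := by
  intro l
  induction l with
  | nil => intro d; rfl
  | cons x xs ih =>
    intro d
    by_cases h : c x <;> simp [h, ih]

theorem extract_frame_spec : Claim_equal_extract_frame := by
  intro tokens labels _
  unfold Spec_extract_frame extract_frame extract_frame_alt
  simp only []
  set pairs := List.zip tokens labels with hpairs
  set flt := pairs.filter (fun p => p.2 ≠ "null") with hflt
  -- rewrite A's loop as an unconditional modify-loop over the swapped filtered pairs
  have hA : ((pairs.foldl
      (fun frame p => if p.2 ≠ "null" then frame.modify p.2 [] (· ++ [p.1]) else frame)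
      PySem.Dict.empty)) =
      ((flt.map (fun p => (p.2, p.1))).foldl
        (fun frame q => frame.modify q.1 [] (· ++ [q.2])) PySem.Dict.empty) := by
    rw [foldl_if_filter (fun p : String × String => p.2 ≠ "null")
        (fun (frame : PySem.Dict String (List String)) p => frame.modify p.2 [] (· ++ [p.1])) pairs]
    rw [List.foldl_map]
  rw [hA]
  set l' := flt.map (fun p => (p.2, p.1)) with hl'
  set d := (l'.foldl (fun frame q => frame.modify q.1 [] (· ++ [q.2])) PySem.Dict.empty) with hd
  have hnd : d.keys.Nodup := by
    rw [hd]
    exact PySem.Dict.nodup_keys_foldl_modify_key l' Prod.fst [] (fun d q => (· ++ [q.2]))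
      PySem.Dict.empty PySem.Dict.nodup_keys_empty
  have hkeys : d.keys = PySem.List.dedup (flt.map (·.2)) := by
    rw [hd]
    have := PySem.Dict.keys_foldl_modify_key (l := l') (key := Prod.fst)
      (f := fun d q => (· ++ [q.2])) (d0 := []) (d := PySem.Dict.empty)
    rw [this]
    simp [PySem.Set.update, PySem.Set.ofList_eq_foldl, PySem.Dict.keys_empty, hl',
      List.map_map, Function.comp_def]
  have hgetD : ∀ k, d.getD k [] = (l'.filter (fun q => q.1 == k)).map (·.2) := by
    intro k
    rw [hd, PySem.Dict.getD_foldl_modify_append]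
    simp [PySem.Dict.getD_empty]
  rw [PySem.Dict.items_eq_map_keys d hnd []]
  rw [hkeys]
  apply List.map_congr_left
  intro k hk
  have hk' : k ≠ "null" := by
    rw [PySem.List.dedup_eq_ofList, PySem.Set.mem_ofList] at hk
    obtain ⟨p, hp, hpk⟩ := List.mem_map.mp hk
    have := List.of_mem_filter hp
    simp only [ne_eq, decide_not, Bool.not_eq_eq_eq_not, Bool.not_true, decide_eq_false_iff_not] at this
    exact hpk ▸ this
  congr 1
  rw [hgetD k, hl']
  rw [List.filter_map]
  rw [List.map_map]
  -- (flt.filter (·.2 == k)).map (·.1) = (pairs.filter (·.2 == k)).map (·.1)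
  have : flt.filter (fun p => ((fun q : String × String => q.1 == k) ∘ (fun p => (p.2, p.1))) p)
      = pairs.filter (fun p => p.2 == k) := by
    rw [hflt, List.filter_filter]
    apply List.filter_congr
    intro p _
    simp only [Function.comp]
    by_cases h : p.2 = k
    · simp [h, hk']
    · simp [h]
  rw [this]
  rfl
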